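-- pv_equiv track=rewrite | github.com/amirulabu/belajarpythonbot | src/helper.py | fix_reply_markup_readable
-- ===== SOURCE A (Python) =====
-- def fix_reply_markup_readable(reply_markup):
--     result = []
--     last_text_is_long = False
--     for row in reply_markup:
--         if len(row["text"]) >= 8:
--             result.append([row])
--             last_text_is_long = True
--         else:
--             if (
--                 len(result) >= 1
--                 and isinstance(result[-1], list)
--                 and last_text_is_long == False
--             ):
--                 result[-1].append(row)
--             else:
--                 result.append([row])
--             last_text_is_long = False
--     return result
-- ===== SOURCE B (Python) =====
-- def fix_reply_markup_readable(reply_markup):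
--     # Run-based decomposition: each long-text button is its own row; a maximal
--     # run of consecutive short-text buttons forms one row.
--     result = []
--     i = 0
--     n = len(reply_markup)
--     while i < n:
--         row = reply_markup[i]
--         i += 1
--         if len(row["text"]) >= 8:
--             result.append([row])
--         else:
--             group = [row]
--             while i < n and len(reply_markup[i]["text"]) < 8:
--                 group.append(reply_markup[i])
--                 i += 1
--             result.append(group)
--     return result
-- ===== Notes on version B (the rewrite author's own statement) =====
-- stated objective: simpler
-- what changed: Replaces A's stateful accumulator pass (last_text_is_long flag plus in-place mutation of the previous result row) with a run-based decomposition: emit each long button as its own row and each maximal run of consecutive short buttons as one row, so each output row is built once and never revisited.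
import Mathlib
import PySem

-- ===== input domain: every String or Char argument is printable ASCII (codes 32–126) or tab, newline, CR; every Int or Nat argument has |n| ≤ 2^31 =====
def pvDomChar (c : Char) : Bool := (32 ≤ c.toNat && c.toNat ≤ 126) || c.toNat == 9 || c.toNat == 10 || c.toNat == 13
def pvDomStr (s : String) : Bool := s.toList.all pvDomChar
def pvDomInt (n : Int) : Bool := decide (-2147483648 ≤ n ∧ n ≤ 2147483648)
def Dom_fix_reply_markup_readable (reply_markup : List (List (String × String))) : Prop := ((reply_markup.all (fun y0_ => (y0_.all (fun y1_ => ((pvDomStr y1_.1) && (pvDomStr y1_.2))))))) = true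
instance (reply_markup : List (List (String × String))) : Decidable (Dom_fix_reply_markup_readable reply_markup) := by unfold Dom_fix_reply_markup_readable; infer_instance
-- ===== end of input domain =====

-- B replaces A's stateful flag-and-mutate accumulator pass with a run-based
-- decomposition (long button = singleton row, maximal run of shorts = one row); simpler, same cost.


-- ===== PORT A =====
-- row["text"] : first-match dict lookup; total via getD "" — Pre_ below guarantees the key is present.
def pvTextLenA (row : List (String × String)) : Int :=
  PySem.Str.len ((PySem.Dict.ofList row).getD "text" "")

-- one loop step of A: state = (result, last_text_is_long).
-- Python's `isinstance(result[-1], list)` is always true (only lists are appended), ported as such.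
def pvStepA (st : List (List (List (String × String))) × Bool) (row : List (String × String)) :
    List (List (List (String × String))) × Bool :=
  if 8 ≤ pvTextLenA row then (st.1 ++ [[row]], true)
  else if 1 ≤ st.1.length ∧ st.2 = false then
    -- result[-1].append(row)
    (st.1.dropLast ++ [(st.1.getLast?.getD []) ++ [row]], false)
  else (st.1 ++ [[row]], false)

def fix_reply_markup_readable (reply_markup : List (List (String × String))) : List (List (List (String × String))) :=
  (reply_markup.foldl pvStepA ([], false)).1

-- ===== PORT B =====
def pvTextLenB (row : List (String × String)) : Int :=
  PySem.Str.len ((PySem.Dict.ofList row).getD "text" "")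

-- the inner while loop of B: split off the leading maximal run of short-text buttons
def pvCollectShorts (rows : List (List (String × String))) :
    List (List (String × String)) × List (List (String × String)) :=
  match rows with
  | [] => ([], [])
  | x :: xs =>
    if pvTextLenB x < 8 then
      let p := pvCollectShorts xs
      (x :: p.1, p.2)
    else ([], x :: xs)

theorem pvCollectShorts_snd_length_le (rows : List (List (String × String))) :
    (pvCollectShorts rows).2.length ≤ rows.length := by
  induction rows with
  | nil => simp [pvCollectShorts]
  | cons x xs ih =>
    simp only [pvCollectShorts]
    split
    · simpa using Nat.le_succ_of_le ih
    · simp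

def fix_reply_markup_readable_alt (reply_markup : List (List (String × String))) : List (List (List (String × String))) :=
  match reply_markup with
  | [] => []
  | r :: rs =>
    if 8 ≤ pvTextLenB r then [r] :: fix_reply_markup_readable_alt rs
    else
      let p := pvCollectShorts rs
      (r :: p.1) :: fix_reply_markup_readable_alt p.2
termination_by reply_markup.length
decreasing_by
  · simp
  · simpa using Nat.lt_succ_of_le (pvCollectShorts_snd_length_le rs)

-- ===== PRECONDITION & SPEC =====
-- Pre_ excludes rows without a "text" key, on which Python A raises KeyError (B raises too).
def Pre_fix_reply_markup_readable (reply_markup : List (List (String × String))) : Prop :=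
  (reply_markup.all (fun row => (PySem.Dict.ofList row).contains "text")) = true
instance (reply_markup : List (List (String × String))) : Decidable (Pre_fix_reply_markup_readable reply_markup) := by unfold Pre_fix_reply_markup_readable; infer_instance

def pvWitness_fix_reply_markup_readable : (List (List (String × String))) :=
  [[("text", "hi")], [("text", "a long button")], [("text", "ok")]]

def Spec_fix_reply_markup_readable (reply_markup : List (List (String × String))) (out : List (List (List (String × String)))) : Prop := out = fix_reply_markup_readable_alt reply_markup
instance (reply_markup : List (List (String × String))) (out : List (List (List (String × String)))) : Decidable (Spec_fix_reply_markup_readable reply_markup out) := by unfold Spec_fix_reply_markup_readable; infer_instance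

-- ===== CLAIM (what is proved, stated in full; the proofs are below) =====
def Claim_equal_fix_reply_markup_readable : Prop := ∀ (reply_markup : List (List (String × String))), Dom_fix_reply_markup_readable reply_markup → Pre_fix_reply_markup_readable reply_markup → Spec_fix_reply_markup_readable reply_markup (fix_reply_markup_readable reply_markup)

-- ===== LEMMAS AND PROOFS =====

theorem pvTextLen_eq (row : List (String × String)) : pvTextLenA row = pvTextLenB row := rfl

-- Combined loop invariant for A's fold, by structural induction on the remaining input:
-- (1) from a state with flag = true the fold appends exactly B's grouping of the rest;
-- (2) from a state (res ++ [g], false) the fold first extends g with the leading run of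
--     shorts and then appends B's grouping of what remains.
theorem pvFoldInv (l : List (List (String × String))) :
    (∀ res : List (List (List (String × String))),
        (List.foldl pvStepA (res, true) l).1 = res ++ fix_reply_markup_readable_alt l) ∧
    (∀ (res : List (List (List (String × String)))) (g : List (List (String × String))),
        (List.foldl pvStepA (res ++ [g], false) l).1
          = res ++ ((g ++ (pvCollectShorts l).1) :: fix_reply_markup_readable_alt (pvCollectShorts l).2)) := by
  induction l with
  | nil =>
    constructor
    · intro res; simp [fix_reply_markup_readable_alt]
    · intro res g; simp [pvCollectShorts, fix_reply_markup_readable_alt]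
  | cons x xs ih =>
    obtain ⟨ih1, ih2⟩ := ih
    constructor
    · intro res
      by_cases hx : 8 ≤ pvTextLenA x
      · have : pvStepA (res, true) x = (res ++ [[x]], true) := by
          simp [pvStepA, hx]
        rw [List.foldl_cons, this, ih1]
        rw [fix_reply_markup_readable_alt]
        simp [← pvTextLen_eq, hx]
      · have : pvStepA (res, true) x = (res ++ [[x]], false) := by
          simp [pvStepA, hx]
        rw [List.foldl_cons, this, ih2 res [x]]
        rw [fix_reply_markup_readable_alt]
        simp [← pvTextLen_eq, hx]
    · intro res g
      by_cases hx : 8 ≤ pvTextLenA x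
      · have : pvStepA (res ++ [g], false) x = ((res ++ [g]) ++ [[x]], true) := by
          simp [pvStepA, hx]
        rw [List.foldl_cons, this, ih1]
        have hcs : pvCollectShorts (x :: xs) = ([], x :: xs) := by
          simp [pvCollectShorts, ← pvTextLen_eq, show ¬ pvTextLenA x < 8 by omega]
        rw [hcs]
        rw [fix_reply_markup_readable_alt]
        simp [← pvTextLen_eq, hx]
      · have : pvStepA (res ++ [g], false) x = (res ++ [g ++ [x]], false) := by
          simp [pvStepA, hx]
        rw [List.foldl_cons, this, ih2 res (g ++ [x])]
        have hcs : pvCollectShorts (x :: xs)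
            = (x :: (pvCollectShorts xs).1, (pvCollectShorts xs).2) := by
          simp [pvCollectShorts, ← pvTextLen_eq, show pvTextLenA x < 8 by omega]
        rw [hcs]
        simp

-- ===== VERDICT (by name: the statement is the Claim_ definition above) =====
theorem fix_reply_markup_readable_spec : Claim_equal_fix_reply_markup_readable := by
  intro l _ _
  unfold Spec_fix_reply_markup_readable fix_reply_markup_readable
  cases l with
  | nil => simp [fix_reply_markup_readable_alt]
  | cons x xs =>
    by_cases hx : 8 ≤ pvTextLenA x
    · have : pvStepA ([], false) x = ([[x]], true) := by simp [pvStepA, hx]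
      rw [List.foldl_cons, this, (pvFoldInv xs).1]
      rw [fix_reply_markup_readable_alt]
      simp [← pvTextLen_eq, hx]
    · have : pvStepA ([], false) x = ([[x]], false) := by simp [pvStepA, hx]
      rw [List.foldl_cons, this,
        show ([[x]] : List (List (List (String × String)))) = [] ++ [[x]] from rfl,
        (pvFoldInv xs).2 [] [x]]
      rw [fix_reply_markup_readable_alt]
      simp [← pvTextLen_eq, hx]
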